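-- pv_equiv track=rewrite | github.com/aurokin/wowhead_cli | packages/warcraft-cli/src/warcraft_cli/main.py | _slugify_path_fragment
-- ===== SOURCE A (Python) =====
-- def _slugify_path_fragment(value: str) -> str:
--     parts = [
--         part
--         for part in "".join(
--             character.lower() if character.isalnum() else " "
--             for character in value.strip()
--         ).split()
--         if part
--     ]
--     if not parts:
--         return "query"
--     return "-".join(parts[:12])
-- ===== SOURCE B (Python) =====
-- def _slugify_path_fragment(value: str) -> str:
--     words = []
--     buf = []
--     for ch in value.strip():
--         if ch.isalnum():
--             buf.append(ch.lower())
--         elif buf: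
--             words.append("".join(buf))
--             buf = []
--     if buf:
--         words.append("".join(buf))
--     if not words:
--         return "query"
--     return "-".join(words[:12])
-- ===== Notes on version B (the rewrite author's own statement) =====
-- stated objective: alternative
-- what changed: Replaces the build-a-spaced-string-then-split pipeline with a single character pass that tokenizes directly into a word buffer flushed on non-alphanumeric characters.
import Mathlib
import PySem

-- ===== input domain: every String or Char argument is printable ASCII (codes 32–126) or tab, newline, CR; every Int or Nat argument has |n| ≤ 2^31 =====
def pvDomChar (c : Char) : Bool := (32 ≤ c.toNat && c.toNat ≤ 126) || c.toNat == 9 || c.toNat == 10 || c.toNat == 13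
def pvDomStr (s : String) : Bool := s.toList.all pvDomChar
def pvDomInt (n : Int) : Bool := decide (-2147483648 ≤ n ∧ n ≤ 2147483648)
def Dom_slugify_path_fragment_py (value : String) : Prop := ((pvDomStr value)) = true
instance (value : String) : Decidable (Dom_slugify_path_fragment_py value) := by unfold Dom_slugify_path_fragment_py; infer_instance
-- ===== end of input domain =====

-- B replaces A's map-to-spaced-string-then-split pipeline by one direct tokenizing pass; alternative decomposition, same cost.

-- ===== PORT A =====
-- "".join(c.lower() if c.isalnum() else " " for c in value.strip())  — a per-character map
def slugAMap (c : Char) : Char :=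
  if PySem.Chars.isalnum c then PySem.Chars.lowerChar c else ' '

def slugify_path_fragment_py (value : String) : String :=
  let joined := ((PySem.Str.strip value).toList).map slugAMap
  let parts := (PySem.Chars.split₀ joined).filter (fun part => !part.isEmpty)
  if parts.isEmpty then "query"
  else String.ofList (PySem.Chars.join ['-'] (PySem.List.slice parts none (some 12)))

-- ===== PORT B =====
-- the single pass: buffer of the current word, flushed on non-alnum characters and at the end
def slugBLoop : List Char → List Char → List (List Char) → List (List Char)
  | [], buf, words => if buf.isEmpty then words else words ++ [buf]
  | c :: cs, buf, words =>
    if PySem.Chars.isalnum c then slugBLoop cs (buf ++ [PySem.Chars.lowerChar c]) words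
    else if buf.isEmpty then slugBLoop cs buf words
    else slugBLoop cs [] (words ++ [buf])

def slugify_path_fragment_py_alt (value : String) : String :=
  let words := slugBLoop ((PySem.Str.strip value).toList) [] []
  if words.isEmpty then "query"
  else String.ofList (PySem.Chars.join ['-'] (words.take 12))

-- ===== PRECONDITION & SPEC =====
def Spec_slugify_path_fragment_py (value : String) (out : String) : Prop := out = slugify_path_fragment_py_alt value
instance (value : String) (out : String) : Decidable (Spec_slugify_path_fragment_py value out) := by unfold Spec_slugify_path_fragment_py; infer_instance

-- ===== CLAIM (what is proved, stated in full; the proofs are below) =====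
def Claim_equal_slugify_path_fragment_py : Prop := ∀ (value : String), Dom_slugify_path_fragment_py value → Spec_slugify_path_fragment_py value (slugify_path_fragment_py value)

-- ===== LEMMAS AND PROOFS =====

-- alnum characters lower to non-space characters (true of every Char, no domain hypothesis needed)
theorem isspace_slugAMap_of_alnum (c : Char) (h : PySem.Chars.isalnum c = true) :
    PySem.Chars.isspace (slugAMap c) = false := by
  rw [slugAMap, if_pos h]
  simp only [PySem.Chars.isalnum, PySem.Chars.isalpha, PySem.Chars.isupper, PySem.Chars.islower,
    PySem.Chars.isdigit, Bool.or_eq_true, Bool.and_eq_true, decide_eq_true_eq] at h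
  have hspace : ∀ d : Char, 48 ≤ d.toNat → d.toNat ≤ 122 → PySem.Chars.isspace d = false := by
    intro d h1 h2
    simp only [PySem.Chars.isspace, Bool.or_eq_false_iff, Bool.and_eq_false_iff,
      decide_eq_false_iff_not]
    omega
  rcases h with (⟨h1, h2⟩ | ⟨h1, h2⟩) | ⟨h1, h2⟩
  · -- uppercase: lowerChar shifts the code point by 32
    have hb : 65 ≤ c.toNat := h1
    have hc : c.toNat ≤ 90 := h2
    have hu : PySem.Chars.isupper c = true := by
      simp only [PySem.Chars.isupper, Bool.and_eq_true, decide_eq_true_eq]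
      exact ⟨h1, h2⟩
    have hv : (c.toNat + 32).isValidChar := Or.inl (by omega)
    have ht : (Char.ofNat (c.toNat + 32)).toNat = c.toNat + 32 := by
      simp [Char.ofNat, hv, Char.toNat_ofNatAux]
    rw [PySem.Chars.lowerChar, if_pos hu]
    exact hspace _ (by omega) (by omega)
  · -- lowercase: lowerChar is the identity
    have hb : 97 ≤ c.toNat := h1
    have hc : c.toNat ≤ 122 := h2
    have hu : PySem.Chars.isupper c = false := by
      simp only [PySem.Chars.isupper, Bool.and_eq_false_iff, decide_eq_false_iff_not]
      right
      intro hA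
      have : c.toNat ≤ 90 := hA
      omega
    rw [PySem.Chars.lowerChar, if_neg (by simp [hu])]
    exact hspace c (by omega) (by omega)
  · -- digit: lowerChar is the identity
    have hb : 48 ≤ c.toNat := h1
    have hc : c.toNat ≤ 57 := h2
    have hu : PySem.Chars.isupper c = false := by
      simp only [PySem.Chars.isupper, Bool.and_eq_false_iff, decide_eq_false_iff_not]
      left
      intro hA
      have : 65 ≤ c.toNat := hA
      omega
    rw [PySem.Chars.lowerChar, if_neg (by simp [hu])]
    exact hspace c (by omega) (by omega)

theorem slugAMap_of_not_alnum (c : Char) (h : PySem.Chars.isalnum c = false) :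
    slugAMap c = ' ' := by simp [slugAMap, h]

-- the split₀ loop over the mapped string IS B's tokenizing loop (accumulators reversed)
theorem split₀_go_map_eq_slugBLoop (cs : List Char) :
    ∀ (buf : List Char) (words : List (List Char)),
      PySem.Chars.split₀.go (cs.map slugAMap) buf.reverse words.reverse
        = slugBLoop cs buf words := by
  induction cs with
  | nil =>
    intro buf words
    simp only [List.map_nil, PySem.Chars.split₀.go, slugBLoop, List.isEmpty_reverse]
    split_ifs with h
    · simp
    · simp
  | cons c cs ih =>
    intro buf words
    simp only [List.map_cons, PySem.Chars.split₀.go, slugBLoop]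
    by_cases ha : PySem.Chars.isalnum c = true
    · rw [if_pos ha, isspace_slugAMap_of_alnum c ha]
      simp only [Bool.false_eq_true, if_false, slugAMap, ha, if_pos]
      have : PySem.Chars.lowerChar c :: buf.reverse = (buf ++ [PySem.Chars.lowerChar c]).reverse := by
        simp
      rw [this, ih]
    · rw [if_neg ha, slugAMap_of_not_alnum c (by simpa using ha)]
      have hsp : PySem.Chars.isspace ' ' = true := by decide
      rw [hsp]
      simp only [if_true, List.isEmpty_reverse]
      by_cases hb : buf.isEmpty
      · rw [if_pos hb, if_pos hb]
        have : buf = [] := List.isEmpty_iff.mp hb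
        subst this
        exact ih [] words
      · rw [if_neg hb, if_neg hb]
        have : buf.reverse.reverse :: words.reverse = (words ++ [buf]).reverse := by simp
        rw [this]
        have := ih [] (words ++ [buf])
        simpa using this
    
-- every word B's loop produces is non-empty (so A's truthiness filter keeps everything)
theorem slugBLoop_ne_nil (cs : List Char) :
    ∀ (buf : List Char) (words : List (List Char)),
      (∀ w ∈ words, w ≠ []) → ∀ w ∈ slugBLoop cs buf words, w ≠ [] := by
  induction cs with
  | nil =>
    intro buf words hw w hmem
    simp only [slugBLoop] at hmem
    split_ifs at hmem with h
    · exact hw w hmem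
    · rcases List.mem_append.mp hmem with h1 | h1
      · exact hw w h1
      · simp only [List.mem_singleton] at h1
        subst h1
        exact fun hc => by simp [hc] at h
  | cons c cs ih =>
    intro buf words hw w hmem
    simp only [slugBLoop] at hmem
    split_ifs at hmem with h1 h2
    · exact ih _ _ hw w hmem
    · exact ih _ _ hw w hmem
    · refine ih _ _ ?_ w hmem
      intro v hv
      rcases List.mem_append.mp hv with h3 | h3
      · exact hw v h3
      · simp only [List.mem_singleton] at h3
        subst h3
        exact fun hc => by simp [hc] at h2

theorem slice_take12 (xs : List (List Char)) :
    PySem.List.slice xs none (some 12) = xs.take 12 := by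
  simp [pysem]

-- ===== VERDICT (by name: the statement is the Claim_ definition above) =====
theorem slugify_path_fragment_py_spec : Claim_equal_slugify_path_fragment_py := by
  intro value _
  unfold Spec_slugify_path_fragment_py slugify_path_fragment_py slugify_path_fragment_py_alt
  have hgo : PySem.Chars.split₀ (((PySem.Str.strip value).toList).map slugAMap)
      = slugBLoop ((PySem.Str.strip value).toList) [] [] := by
    have := split₀_go_map_eq_slugBLoop ((PySem.Str.strip value).toList) [] []
    simpa [PySem.Chars.split₀] using this
  have hfil : (slugBLoop ((PySem.Str.strip value).toList) [] []).filter (fun part => !part.isEmpty)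
      = slugBLoop ((PySem.Str.strip value).toList) [] [] := by
    apply List.filter_eq_self.mpr
    intro w hw
    have := slugBLoop_ne_nil ((PySem.Str.strip value).toList) [] [] (by simp) w hw
    simpa [List.isEmpty_iff] using this
  simp only [hgo, hfil, slice_take12]
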